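-- pv_equiv track=rewrite | github.com/ZhenyanLuo/Apsi-diagnostic | SOG_primalscheme.py | count_gaps_after_nucleotide
-- ===== SOURCE A (Python) =====
-- def count_gaps_after_nucleotide(sequence):
--     gap_count = 0
--     for char in sequence[::-1]:
--         if char == '-':
--             gap_count += 1
--         elif char in 'ATCGU':
--             break
--     return gap_count
-- ===== SOURCE B (Python) =====
-- def count_gaps_after_nucleotide(sequence):
--     last = -1
--     for i, ch in enumerate(sequence):
--         if ch in 'ATCGU':
--             last = i
--     return sequence[last + 1:].count('-')
-- ===== Notes on version B (the rewrite author's own statement) =====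
-- stated objective: simpler
-- what changed: Replaces the reverse scan with break/skip state by a forward scan that records the last nucleotide index and then counts the gap characters in the suffix after it.
import Mathlib
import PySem

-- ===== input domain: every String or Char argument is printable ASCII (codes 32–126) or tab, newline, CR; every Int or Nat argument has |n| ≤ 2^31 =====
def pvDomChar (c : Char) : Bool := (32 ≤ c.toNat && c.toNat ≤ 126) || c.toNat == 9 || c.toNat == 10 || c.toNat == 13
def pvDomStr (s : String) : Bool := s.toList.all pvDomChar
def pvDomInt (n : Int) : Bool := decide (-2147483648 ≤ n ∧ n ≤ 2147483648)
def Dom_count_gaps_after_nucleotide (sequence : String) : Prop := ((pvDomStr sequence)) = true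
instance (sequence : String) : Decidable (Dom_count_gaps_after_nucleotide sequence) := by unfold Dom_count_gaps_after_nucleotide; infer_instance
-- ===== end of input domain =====

-- B replaces A's reverse scan (with break/skip) by a forward scan for the last nucleotide
-- index followed by counting the gap characters in the suffix after it (objective: simpler).


-- ===== PORT A =====
-- 'for char in sequence[::-1]: …' with break: structural recursion over the reversed char list.
def cganLoopA : List Char → Int → Int
  | [], acc => acc
  | c :: rest, acc =>
    if c = '-' then cganLoopA rest (acc + 1)
    else if ("ATCGU".toList).contains c then acc   -- break: return current gap_count
    else cganLoopA rest acc

def count_gaps_after_nucleotide (sequence : String) : Int :=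
  cganLoopA sequence.toList.reverse 0

-- ===== PORT B =====
-- forward scan: foldl state = (last nucleotide index so far, current index);
-- then sequence[last+1:].count('-') — str.count with a single character = List.count of that char.
def count_gaps_after_nucleotide_alt (sequence : String) : Int :=
  -- last = index of last nucleotide (-1 if none), from the forward foldl; then
  -- sequence[last+1:].count('-') — str.count with a single character = List.count of that char.
  ((PySem.List.slice sequence.toList
      (some ((sequence.toList.foldl (fun (p : Int × Int) ch =>
        ((if ("ATCGU".toList).contains ch then p.2 else p.1), p.2 + 1)) (-1, 0)).1 + 1))
      none).count '-' : Int)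

-- ===== PRECONDITION & SPEC =====
def Spec_count_gaps_after_nucleotide (sequence : String) (out : Int) : Prop := out = count_gaps_after_nucleotide_alt sequence
instance (sequence : String) (out : Int) : Decidable (Spec_count_gaps_after_nucleotide sequence out) := by unfold Spec_count_gaps_after_nucleotide; infer_instance

-- ===== CLAIM (what is proved, stated in full; the proofs are below) =====
def Claim_equal_count_gaps_after_nucleotide : Prop := ∀ (sequence : String), Dom_count_gaps_after_nucleotide sequence → Spec_count_gaps_after_nucleotide sequence (count_gaps_after_nucleotide sequence)

-- ===== LEMMAS AND PROOFS =====

-- A's loop in closed form: it counts '-' in the prefix of l before the first nucleotide.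
theorem cganLoopA_eq (l : List Char) (acc : Int) :
    cganLoopA l acc = acc + ((l.takeWhile (fun c => !("ATCGU".toList).contains c)).count '-' : Int) := by
  induction l generalizing acc with
  | nil => simp [cganLoopA]
  | cons c rest ih =>
    simp only [cganLoopA]
    by_cases hdash : c = '-'
    · subst hdash
      rw [if_pos rfl, ih, List.takeWhile_cons_of_pos (by decide)]
      simp [List.count_cons]
      ring
    · rw [if_neg hdash]
      by_cases hnuc : ("ATCGU".toList).contains c = true
      · rw [if_pos hnuc,
          List.takeWhile_cons_of_neg (by simp only [hnuc, Bool.not_true]; decide)]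
        simp
      · have hnuc' : ("ATCGU".toList).contains c = false := Bool.eq_false_iff.mpr hnuc
        rw [if_neg hnuc, ih,
          List.takeWhile_cons_of_pos (by simp only [hnuc', Bool.not_false]),
          List.count_cons]
        simp [hdash]

-- 1-based position just after the LAST nucleotide (0 if none), counted from the front.
def cganLastPlusOne : List Char → Nat
  | [] => 0
  | c :: rest =>
    if cganLastPlusOne rest = 0 then (if ("ATCGU".toList).contains c then 1 else 0)
    else cganLastPlusOne rest + 1

-- cganLastPlusOne l = 0 iff l has no nucleotide.
theorem cganLastPlusOne_eq_zero (l : List Char) :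
    cganLastPlusOne l = 0 ↔ ∀ x ∈ l, ("ATCGU".toList).contains x = false := by
  induction l with
  | nil => simp [cganLastPlusOne]
  | cons c rest ih =>
    simp only [cganLastPlusOne]
    constructor
    · intro h x hx
      rcases List.mem_cons.mp hx with hxc | hxr
      · subst hxc
        split at h
        · split at h
          · omega
          · exact Bool.eq_false_iff.mpr (by assumption)
        · omega
      · split at h
        · exact (ih.mp (by assumption)) x hxr
        · omega
    · intro h
      have hr : cganLastPlusOne rest = 0 := ih.mpr (fun x hx => h x (List.mem_cons_of_mem _ hx))
      rw [if_pos hr, show (("ATCGU".toList).contains c) = false from h c List.mem_cons_self, if_neg (by decide)]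

-- B's foldl fst computes cganLastPlusOne - 1 shifted by the start index.
theorem cganFold_fst (l : List Char) (a i : Int) :
    (l.foldl (fun (p : Int × Int) ch =>
      ((if ("ATCGU".toList).contains ch then p.2 else p.1), p.2 + 1)) (a, i)).1
      = if cganLastPlusOne l = 0 then a else i + (cganLastPlusOne l : Int) - 1 := by
  induction l generalizing a i with
  | nil => simp [cganLastPlusOne]
  | cons c rest ih =>
    simp only [List.foldl_cons, cganLastPlusOne]
    rw [ih]
    by_cases hr : cganLastPlusOne rest = 0
    · rw [if_pos hr, if_pos hr]
      by_cases hnuc : ("ATCGU".toList).contains c = true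
      · rw [if_pos hnuc, if_pos hnuc, if_neg (by omega)]
        push_cast; ring
      · rw [if_neg hnuc, if_neg hnuc, if_pos rfl]
    · rw [if_neg hr, if_neg hr, if_neg (by omega)]
      push_cast; ring

-- takeWhile over an append: all of l1 passes / something in l1 stops it.
theorem cganTwAll (p : Char → Bool) (l1 l2 : List Char) (h : ∀ x ∈ l1, p x = true) :
    (l1 ++ l2).takeWhile p = l1 ++ l2.takeWhile p := by
  induction l1 with
  | nil => simp
  | cons a tl ih =>
    rw [List.cons_append, List.takeWhile_cons_of_pos (h a List.mem_cons_self),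
      ih (fun x hx => h x (List.mem_cons_of_mem _ hx)), List.cons_append]

theorem cganTwStop (p : Char → Bool) (l1 l2 : List Char) (h : ¬ ∀ x ∈ l1, p x = true) :
    (l1 ++ l2).takeWhile p = l1.takeWhile p := by
  induction l1 with
  | nil => exact absurd (by simp) h
  | cons a tl ih =>
    by_cases ha : p a = true
    · rw [List.cons_append, List.takeWhile_cons_of_pos ha, List.takeWhile_cons_of_pos ha,
        ih (fun hall => h (by
          intro x hx
          rcases List.mem_cons.mp hx with hxa | hxt
          · subst hxa; exact ha
          · exact hall x hxt))]
    · rw [List.cons_append, List.takeWhile_cons_of_neg ha, List.takeWhile_cons_of_neg ha]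

-- The core identity: counting '-' before the first nucleotide of the reverse
-- equals counting '-' after the last nucleotide.
theorem cgan_core (cs : List Char) :
    ((cs.reverse.takeWhile (fun c => !("ATCGU".toList).contains c)).count '-' : Int)
      = ((cs.drop (cganLastPlusOne cs)).count '-' : Int) := by
  induction cs with
  | nil => simp [cganLastPlusOne]
  | cons c rest ih =>
    simp only [List.reverse_cons, cganLastPlusOne]
    by_cases hr : cganLastPlusOne rest = 0
    · have hnone := (cganLastPlusOne_eq_zero rest).mp hr
      have hall : ∀ x ∈ rest.reverse, (fun c => !("ATCGU".toList).contains c) x = true := by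
        intro x hx
        simp only [hnone x (List.mem_reverse.mp hx), Bool.not_false]
      rw [cganTwAll _ _ _ hall, if_pos hr]
      by_cases hnuc : ("ATCGU".toList).contains c = true
      · rw [List.takeWhile_cons_of_neg (by simp only [hnuc, Bool.not_true]; decide),
          if_pos hnuc]
        simp [List.count_reverse]
      · have hnuc' : ("ATCGU".toList).contains c = false := Bool.eq_false_iff.mpr hnuc
        rw [List.takeWhile_cons_of_pos (by simp only [hnuc', Bool.not_false]),
          if_neg hnuc]
        simp only [List.takeWhile_nil, List.drop_zero, List.count_append,
          List.count_reverse, List.count_cons, List.count_nil]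
        push_cast; ring
    · have hstop : ¬ ∀ x ∈ rest.reverse, (fun c => !("ATCGU".toList).contains c) x = true := by
        intro hall
        apply hr
        apply (cganLastPlusOne_eq_zero rest).mpr
        intro x hx
        have := hall x (List.mem_reverse.mpr hx)
        simpa only [Bool.not_eq_true'] using this
      rw [cganTwStop _ _ _ hstop, ih, if_neg hr, List.drop_succ_cons]

-- ===== VERDICT (by name: the statement is the Claim_ definition above) =====
theorem count_gaps_after_nucleotide_spec : Claim_equal_count_gaps_after_nucleotide := by
  intro s _
  unfold Spec_count_gaps_after_nucleotide count_gaps_after_nucleotide count_gaps_after_nucleotide_alt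
  rw [cganLoopA_eq, cganFold_fst]
  by_cases hz : cganLastPlusOne s.toList = 0
  · rw [if_pos hz]
    have h0 : (-1 : Int) + 1 = ((0 : Nat) : Int) := by norm_num
    rw [h0, PySem.List.slice_from_natCast]
    simpa [hz] using cgan_core s.toList
  · rw [if_neg hz]
    have h1 : (0 : Int) + (cganLastPlusOne s.toList : Int) - 1 + 1
        = ((cganLastPlusOne s.toList : Nat) : Int) := by ring
    rw [h1, PySem.List.slice_from_natCast]
    simpa using cgan_core s.toList
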